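-- pv_equiv track=rewrite | github.com/hiroyone/python_coding_challenges | Strings/the-minion-game-optimized.py | count_substring_initials
-- ===== SOURCE A (Python) =====
-- def count_substring_initials(string):
--     alphabet_frequency = {}
--     length = len(string)
--     for i in range(len(string)):
--         # The number of times substrings appears with the letter:string[i]
--         if string[i] in alphabet_frequency:
--             alphabet_frequency[string[i]] += length - i
--         else:
--             alphabet_frequency[string[i]] = length - i
--     return alphabet_frequency
-- ===== SOURCE B (Python) =====
-- def count_substring_initials(string):
--     # Staged closed-form version: for each distinct character (first-occurrence
--     # order), its total sum of (length - i) over its positions equals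
--     # count * length - sum(positions).
--     n = len(string)
--     result = {}
--     for c in dict.fromkeys(string):
--         positions = [i for i, ch in enumerate(string) if ch == c]
--         result[c] = len(positions) * n - sum(positions)
--     return result
-- ===== Notes on version B (the rewrite author's own statement) =====
-- stated objective: alternative
-- what changed: Replaces A's single incremental dict-accumulation loop by a staged computation: first dedupe the characters (dict.fromkeys), then for each distinct character gather its index positions and compute its total in closed form as count*length - sum(positions).
import Mathlib
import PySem

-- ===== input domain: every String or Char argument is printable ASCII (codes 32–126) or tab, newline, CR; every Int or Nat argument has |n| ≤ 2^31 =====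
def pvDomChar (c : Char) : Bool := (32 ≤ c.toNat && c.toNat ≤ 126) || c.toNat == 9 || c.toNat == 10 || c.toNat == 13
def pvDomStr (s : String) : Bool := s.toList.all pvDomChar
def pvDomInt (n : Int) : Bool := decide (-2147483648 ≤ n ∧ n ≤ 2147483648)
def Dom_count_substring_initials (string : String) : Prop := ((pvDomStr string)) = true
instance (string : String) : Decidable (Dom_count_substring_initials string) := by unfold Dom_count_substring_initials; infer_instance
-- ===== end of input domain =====

-- B replaces A's incremental dict-accumulation loop by a staged computation: dedupe the
-- characters first, then per distinct character gather its positions and use the closed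
-- form count*length - sum(positions) (objective: alternative decomposition).

-- ===== PORT A =====
-- literal port of A; the local 'length' and the indexing 'string[i]' are inlined
-- (string[i] is in range for every i of the loop, so pyGetD is exact here)
def count_substring_initials (string : String) : List (String × Int) :=
  ((PySem.List.pyRange 0 (PySem.Str.len string)).foldl
    (fun (d : PySem.Dict String Int) i =>
      if d.contains (String.ofList [PySem.List.pyGetD string.toList i ' ']) then
        d.modify (String.ofList [PySem.List.pyGetD string.toList i ' ']) 0
          (· + (PySem.Str.len string - i))
      else
        d.insert (String.ofList [PySem.List.pyGetD string.toList i ' '])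
          (PySem.Str.len string - i))
    PySem.Dict.empty).items

-- ===== PORT B =====
-- port of Source B: dict.fromkeys(string) is PySem.List.dedup; 'positions' is the filtered
-- enumerate comprehension; len(positions)*n - sum(positions) is the inserted value
def count_substring_initials_alt (string : String) : List (String × Int) :=
  ((PySem.List.dedup string.toList).foldl
    (fun (d : PySem.Dict String Int) c =>
      let positions := ((PySem.List.enumerate string.toList 0).filter
          (fun p => p.2 == c)).map (fun p => p.1)
      d.insert (String.ofList [c])
        (PySem.List.len positions * PySem.Str.len string - positions.sum))
    PySem.Dict.empty).items

-- ===== PRECONDITION & SPEC =====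
def Spec_count_substring_initials (string : String) (out : List (String × Int)) : Prop := out = count_substring_initials_alt string
instance (string : String) (out : List (String × Int)) : Decidable (Spec_count_substring_initials string out) := by unfold Spec_count_substring_initials; infer_instance

-- ===== CLAIM (what is proved, stated in full; the proofs are below) =====
def Claim_equal_count_substring_initials : Prop := ∀ (string : String), Dom_count_substring_initials string → Spec_count_substring_initials string (count_substring_initials string)

-- ===== LEMMAS AND PROOFS =====

-- A's if/modify/insert step is one insert-accumulate step
lemma stepA_eq (d : PySem.Dict String Int) (c : String) (v : Int) :
    (if d.contains c then d.modify c 0 (· + v) else d.insert c v)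
      = d.insert c (d.getD c 0 + v) := by
  by_cases h : d.contains c
  · simp [h, PySem.Dict.modify]
  · simp only [Bool.not_eq_true] at h
    simp [h, PySem.Dict.getD_of_not_contains _ _ h]

-- value of an insert-accumulate fold: the default plus the sum of matching values
lemma getD_foldl_insertAdd {β : Type} (l : List β) (k : β → String) (v : β → Int)
    (d : PySem.Dict String Int) (c : String) :
    (l.foldl (fun (d : PySem.Dict String Int) a => d.insert (k a) (d.getD (k a) 0 + v a)) d).getD c 0
      = d.getD c 0 + ((l.filter (fun a => k a == c)).map v).sum := by
  induction l generalizing d with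
  | nil => simp
  | cons x t ih =>
      simp only [List.foldl_cons, ih, List.filter_cons]
      by_cases h : c = k x
      · subst h
        simp [PySem.Dict.getD_insert_self]
        ring
      · have h' : (k x == c) = false := by
          simpa [beq_iff_eq] using fun he => h he.symm
        simp [h', PySem.Dict.getD_insert, h]

-- Set.ofList commutes with an injective map
lemma ofList_map_inj {α β : Type} [DecidableEq α] [DecidableEq β] (f : α → β)
    (hf : Function.Injective f) (l : List α) :
    PySem.Set.ofList (l.map f) = (PySem.Set.ofList l).map f := by
  induction l using List.reverseRecOn with
  | nil => simp [PySem.Set.ofList]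
  | append_singleton t x ih =>
      rw [List.map_append, List.map_singleton, PySem.Set.ofList_append_singleton,
        PySem.Set.ofList_append_singleton, ih]
      by_cases hx : x ∈ t
      · have hmem : ∃ a ∈ t, f a = f x := ⟨x, hx, rfl⟩
        simp [PySem.Set.add, PySem.Set.contains, PySem.Set.mem_ofList, hx, hmem]
      · have hmem : ¬ ∃ a ∈ t, f a = f x := by
          rintro ⟨a, ha, he⟩
          exact hx (hf he ▸ ha)
        simp [PySem.Set.add, PySem.Set.contains, PySem.Set.mem_ofList, hx, hmem]

-- the B-side fold inserts fresh distinct single-character keys, so its items are a plain map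
lemma foldl_insert_items (l : List Char) (v : Char → Int) (d : PySem.Dict String Int)
    (h : ∀ c ∈ l, d.contains (String.ofList [c]) = false)
    (hnd : (l.map (fun c => String.ofList [c])).Nodup) :
    (l.foldl (fun (d : PySem.Dict String Int) c => d.insert (String.ofList [c]) (v c)) d).items
      = d.items ++ l.map (fun c => (String.ofList [c], v c)) := by
  induction l generalizing d with
  | nil => simp
  | cons x t ih =>
      simp only [List.map_cons, List.nodup_cons, List.mem_map] at hnd
      simp only [List.foldl_cons]
      rw [ih _ (fun c hc => by
          rw [PySem.Dict.contains_insert]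
          have h1 : (String.ofList [c] == String.ofList [x]) = false := by
            simp only [beq_eq_false_iff_ne, ne_eq]
            intro he
            exact hnd.1 ⟨c, hc, he⟩
          rw [h1, h c (List.mem_cons_of_mem x hc)]
          simp) hnd.2]
      rw [PySem.Dict.items_insert, h x List.mem_cons_self]
      simp

-- closed form: sum of (n - i) over a list of indices
lemma sum_map_sub_closed (l : List Int) (n : Int) :
    (l.map (fun i => n - i)).sum = (l.length : Int) * n - l.sum := by
  induction l with
  | nil => simp
  | cons x t ih => simp [ih]; ring

-- ===== VERDICT (by name: the statement is the Claim_ definition above) =====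
set_option maxHeartbeats 1000000 in
theorem count_substring_initials_spec : Claim_equal_count_substring_initials := by
  intro s _
  unfold Spec_count_substring_initials count_substring_initials count_substring_initials_alt
  set cs := s.toList with hcs
  -- A's fold over range-of-indices is an insert-accumulate fold over enumerate
  have hA : (PySem.List.pyRange 0 (PySem.Str.len s)).foldl
      (fun (d : PySem.Dict String Int) i =>
        if d.contains (String.ofList [PySem.List.pyGetD cs i ' ']) then
          d.modify (String.ofList [PySem.List.pyGetD cs i ' ']) 0 (· + (PySem.Str.len s - i))
        else d.insert (String.ofList [PySem.List.pyGetD cs i ' ']) (PySem.Str.len s - i))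
      PySem.Dict.empty
    = (PySem.List.enumerate cs 0).foldl
        (fun (d : PySem.Dict String Int) p =>
          d.insert (String.ofList [p.2]) (d.getD (String.ofList [p.2]) 0 + (PySem.Str.len s - p.1)))
        PySem.Dict.empty := by
    have hlen : PySem.Str.len s = PySem.List.len cs := by
      simp [PySem.Str.len_eq, PySem.List.len, hcs]
    rw [hlen, PySem.List.enumerate_eq_map_pyRange cs ' ', List.foldl_map]
    exact PySem.List.foldl_congr_mem _ _ _ _
      (fun d i _ => stepA_eq d (String.ofList [PySem.List.pyGetD cs i ' ']) (PySem.List.len cs - i))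
  rw [hA]
  -- the A-side dict has Nodup keys, so its items are keys paired with their getD values
  have hndA : ((PySem.List.enumerate cs 0).foldl
      (fun (d : PySem.Dict String Int) p =>
        d.insert (String.ofList [p.2]) (d.getD (String.ofList [p.2]) 0 + (PySem.Str.len s - p.1)))
      PySem.Dict.empty).keys.Nodup :=
    PySem.Dict.nodup_keys_foldl_insert_key (PySem.List.enumerate cs 0)
      (fun p => String.ofList [p.2]) _ _ PySem.Dict.nodup_keys_empty
  rw [PySem.Dict.items_eq_map_keys _ hndA 0]
  have hinj : Function.Injective (fun ch : Char => String.ofList [ch]) := by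
    intro a b h
    have := congrArg String.toList h
    simp at this
    exact this
  have hkeysA : ((PySem.List.enumerate cs 0).foldl
      (fun (d : PySem.Dict String Int) p =>
        d.insert (String.ofList [p.2]) (d.getD (String.ofList [p.2]) 0 + (PySem.Str.len s - p.1)))
      PySem.Dict.empty).keys = (PySem.List.dedup cs).map (fun ch => String.ofList [ch]) := by
    rw [PySem.Dict.keys_foldl_insert_key (PySem.List.enumerate cs 0) (fun p => String.ofList [p.2])]
    rw [show (PySem.List.enumerate cs 0).map (fun p => String.ofList [p.2])
        = cs.map (fun ch => String.ofList [ch]) by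
      rw [show (fun (p : Int × Char) => String.ofList [p.2])
          = (fun ch => String.ofList [ch]) ∘ (fun (p : Int × Char) => p.2) from rfl]
      rw [← List.map_map, PySem.List.map_snd_enumerate]]
    rw [PySem.Dict.keys_empty, PySem.Set.update_nil_left, PySem.List.dedup_eq_ofList,
      ofList_map_inj _ hinj]
  rw [hkeysA]
  -- the B-side fold inserts fresh distinct keys, so its items are a plain map
  have hndd : ((PySem.List.dedup cs).map (fun ch => String.ofList [ch])).Nodup :=
    (PySem.List.nodup_dedup cs).map hinj
  have hB : ((PySem.List.dedup cs).foldl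
      (fun (d : PySem.Dict String Int) c =>
        let positions := ((PySem.List.enumerate cs 0).filter
            (fun p => p.2 == c)).map (fun p => p.1)
        d.insert (String.ofList [c])
          (PySem.List.len positions * PySem.Str.len s - positions.sum))
      PySem.Dict.empty)
    = ((PySem.List.dedup cs).foldl
        (fun (d : PySem.Dict String Int) c =>
          d.insert (String.ofList [c])
            (PySem.List.len (((PySem.List.enumerate cs 0).filter
                (fun p => p.2 == c)).map (fun p => p.1)) * PySem.Str.len s
              - (((PySem.List.enumerate cs 0).filter
                (fun p => p.2 == c)).map (fun p => p.1)).sum))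
        PySem.Dict.empty) := rfl
  rw [hB, foldl_insert_items (PySem.List.dedup cs)
      (fun c => PySem.List.len (((PySem.List.enumerate cs 0).filter
          (fun p => p.2 == c)).map (fun p => p.1)) * PySem.Str.len s
        - (((PySem.List.enumerate cs 0).filter
          (fun p => p.2 == c)).map (fun p => p.1)).sum)
      PySem.Dict.empty (fun _ _ => PySem.Dict.contains_empty _) hndd]
  rw [show (PySem.Dict.empty : PySem.Dict String Int).items = [] from rfl,
    List.nil_append, List.map_map]
  apply List.map_congr_left
  intro c hc
  simp only [Function.comp_def]
  congr 1
  -- A's accumulated value at key (single c) equals B's closed form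
  rw [getD_foldl_insertAdd (PySem.List.enumerate cs 0) (fun p => String.ofList [p.2])
      (fun p => PySem.Str.len s - p.1) PySem.Dict.empty (String.ofList [c])]
  rw [PySem.Dict.getD_empty, zero_add]
  have hfilt : (PySem.List.enumerate cs 0).filter
        (fun p => String.ofList [p.2] == String.ofList [c])
      = (PySem.List.enumerate cs 0).filter (fun p => p.2 == c) := by
    apply List.filter_congr
    intro p _
    by_cases h : p.2 = c
    · simp [h]
    · have hne : String.ofList [p.2] ≠ String.ofList [c] := fun he => h (hinj he)
      simp [h, hne]
  rw [hfilt]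
  rw [show ((PySem.List.enumerate cs 0).filter (fun p => p.2 == c)).map
        (fun p => PySem.Str.len s - p.1)
      = (((PySem.List.enumerate cs 0).filter (fun p => p.2 == c)).map (fun p => p.1)).map
        (fun i => PySem.Str.len s - i) by rw [List.map_map]; rfl]
  rw [sum_map_sub_closed]
  simp [PySem.List.len]
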